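-- pv_equiv track=rewrite | github.com/tsn23091-byte/press2ppt | app.py | _best_from_srcset
-- ===== SOURCE A (Python) =====
-- from typing import List, Optional
--
-- def _best_from_srcset(srcset: str) -> Optional[str]:
--     try:
--         parts = [p.strip() for p in srcset.split(",") if p.strip()]
--         pairs = []
--         for p in parts:
--             s = p.split()
--             if len(s) == 1:
--                 pairs.append((s[0], 0))
--             else:
--                 w = 0
--                 try:
--                     if s[1].endswith("w"):
--                         w = int(s[1][:-1])
--                 except Exception:
--                     pass
--                 pairs.append((s[0], w))
--         pairs.sort(key=lambda x: x[1], reverse=True)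
--         return pairs[0][0] if pairs else None
--     except Exception:
--         return None
-- ===== SOURCE B (Python) =====
-- from typing import Optional
--
-- def _best_from_srcset(srcset: str) -> Optional[str]:
--     best_url = None
--     best_w = 0
--     for p in srcset.split(","):
--         s = p.strip().split()
--         if not s:
--             continue
--         w = 0
--         if len(s) > 1 and s[1].endswith("w"):
--             try:
--                 w = int(s[1][:-1])
--             except ValueError:
--                 pass
--         if best_url is None or w > best_w:
--             best_url = s[0]
--             best_w = w
--     return best_url
-- ===== Notes on version B (the rewrite author's own statement) =====
-- stated objective: simpler
-- what changed: Instead of building a (url,width) pairs list and stable reverse-sorting it to take the head, B keeps a running best url/width in a single pass, updating only on strictly greater width so the first among equal widths wins.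
import Mathlib
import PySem

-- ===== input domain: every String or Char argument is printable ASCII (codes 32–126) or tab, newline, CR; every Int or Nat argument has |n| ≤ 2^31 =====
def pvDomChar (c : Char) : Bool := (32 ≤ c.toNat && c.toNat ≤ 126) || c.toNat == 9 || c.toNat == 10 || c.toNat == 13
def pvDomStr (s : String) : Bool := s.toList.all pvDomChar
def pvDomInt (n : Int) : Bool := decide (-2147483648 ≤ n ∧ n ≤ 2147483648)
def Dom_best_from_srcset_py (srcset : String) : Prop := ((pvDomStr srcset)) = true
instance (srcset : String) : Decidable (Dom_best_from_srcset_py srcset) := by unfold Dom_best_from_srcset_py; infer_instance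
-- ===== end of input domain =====

-- B replaces A's "collect (url,width) pairs, stable reverse-sort, take head" with a single
-- pass keeping a running best (strict '>' so the first among equal widths wins): simpler.


-- ===== PORT A =====
-- width logic, identical in both Pythons: w = int(s1[:-1]) if s1.endswith("w") else 0, and 0 on ValueError
def pvWidth (s1 : String) : Int :=
  if PySem.Str.endswith s1 "w" then (PySem.Int.ofStr? (PySem.Str.slice s1 none (some (-1)))).getD 0
  else 0

-- one part → its (url, width) pair; none when p.split() is empty (unreachable in A, whose parts are stripped nonempty)
def pvPair (p : String) : Option (String × Int) :=
  match PySem.Str.split₀ p with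
  | [] => none
  | [s0] => some (s0, 0)
  | s0 :: s1 :: _ => some (s0, pvWidth s1)

def best_from_srcset_py (srcset : String) : Option String :=
  let parts := ((((PySem.Str.split? srcset ",").getD []).map PySem.Str.strip).filter (· ≠ ""))
  let pairs := parts.foldl (fun acc p =>
    match pvPair p with
    | none => acc
    | some pr => acc ++ [pr]) []
  match PySem.List.sorted pairs (fun x => x.2) true with
  | [] => none
  | (u, _) :: _ => some u

-- ===== PORT B =====
def best_from_srcset_py_alt (srcset : String) : Option String :=
  (((PySem.Str.split? srcset ",").getD []).foldl (fun best p =>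
    match pvPair (PySem.Str.strip p) with
    | none => best
    | some (u, w) =>
      match best with
      | none => some (u, w)
      | some (bu, bw) => if bw < w then some (u, w) else some (bu, bw)) none).map Prod.fst

-- ===== PRECONDITION & SPEC =====
def Spec_best_from_srcset_py (srcset : String) (out : Option String) : Prop := out = best_from_srcset_py_alt srcset
instance (srcset : String) (out : Option String) : Decidable (Spec_best_from_srcset_py srcset out) := by unfold Spec_best_from_srcset_py; infer_instance

-- ===== CLAIM (what is proved, stated in full; the proofs are below) =====
def Claim_equal_best_from_srcset_py : Prop := ∀ (srcset : String), Dom_best_from_srcset_py srcset → Spec_best_from_srcset_py srcset (best_from_srcset_py srcset)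

-- ===== LEMMAS AND PROOFS =====

-- B's running-best step, on pairs
def pvStep (b : Option (String × Int)) (x : String × Int) : Option (String × Int) :=
  match b with
  | none => some x
  | some h => if h.2 < x.2 then some x else some h

lemma pairs_eq_filterMap (l : List String) (acc : List (String × Int)) :
    l.foldl (fun acc p => match pvPair p with | none => acc | some pr => acc ++ [pr]) acc
      = acc ++ l.filterMap pvPair := by
  induction l generalizing acc with
  | nil => simp
  | cons p t ih =>
    cases h : pvPair p with
    | none => simp only [List.foldl_cons, h, List.filterMap_cons, ih]
    | some pr => simp only [List.foldl_cons, h, List.filterMap_cons, ih, List.append_assoc,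
        List.singleton_append]

lemma pvPair_empty : pvPair "" = none := rfl

lemma head_insertBy (x : String × Int) (acc : List (String × Int)) :
    (PySem.List.insertBy (fun a b => decide ((b : String × Int).2 < a.2)) x acc).head?
      = pvStep acc.head? x := by
  cases acc with
  | nil => rfl
  | cons h t =>
    simp only [PySem.List.insertBy, pvStep, List.head?_cons]
    by_cases hlt : h.2 < x.2 <;> simp [hlt]

lemma head_foldl_insertBy (xs : List (String × Int)) (acc : List (String × Int)) :
    (xs.foldl (fun acc x => PySem.List.insertBy (fun a b => decide ((b : String × Int).2 < a.2)) x acc) acc).head?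
      = xs.foldl (fun b x => pvStep b x) acc.head? := by
  induction xs generalizing acc with
  | nil => rfl
  | cons x t ih => rw [List.foldl_cons, ih, head_insertBy, List.foldl_cons]

-- head of the stable reverse sort = single-pass strict-max fold (first among ties wins)
lemma sorted_rev_head (xs : List (String × Int)) :
    (PySem.List.sorted xs (fun x => x.2) true).head? = xs.foldl pvStep none := by
  rw [PySem.List.sorted_rev_eq_foldl_insertBy]
  simpa using head_foldl_insertBy xs []

lemma foldl_filterMap_step (l : List String) (b : Option (String × Int)) :
    l.foldl (fun best p =>
        match pvPair (PySem.Str.strip p) with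
        | none => best
        | some (u, w) =>
          match best with
          | none => some (u, w)
          | some (bu, bw) => if bw < w then some (u, w) else some (bu, bw)) b
      = (l.filterMap (fun p => pvPair (PySem.Str.strip p))).foldl pvStep b := by
  induction l generalizing b with
  | nil => rfl
  | cons p t ih =>
    cases h : pvPair (PySem.Str.strip p) with
    | none => simp only [List.foldl_cons, h, List.filterMap_cons, ih]
    | some pr =>
      cases pr with
      | mk u w =>
        simp only [List.foldl_cons, h, List.filterMap_cons, ih]
        congr 1
        cases b with
        | none => rfl
        | some hb => cases hb; simp [pvStep]

-- A's filter (p.strip() truthy) is absorbed by pvPair "" = none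
set_option maxHeartbeats 2000000 in
lemma filterMap_filter_strip (l : List String) :
    ((l.map PySem.Str.strip).filter (· ≠ "")).filterMap pvPair
      = l.filterMap (fun p => pvPair (PySem.Str.strip p)) := by
  induction l with
  | nil => rfl
  | cons p t ih =>
    by_cases h : PySem.Str.strip p = ""
    · rw [List.map_cons, List.filter_cons_of_neg (by simp [h]), ih, List.filterMap_cons, h,
        pvPair_empty]
    · rw [List.map_cons, List.filter_cons_of_pos (by simp [h]), List.filterMap_cons,
        List.filterMap_cons, ih]

-- ===== VERDICT (by name: the statement is the Claim_ definition above) =====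
set_option maxHeartbeats 2000000 in
theorem best_from_srcset_py_spec : Claim_equal_best_from_srcset_py := by
  intro srcset _
  unfold Spec_best_from_srcset_py best_from_srcset_py best_from_srcset_py_alt
  simp only [foldl_filterMap_step, pairs_eq_filterMap, List.nil_append, filterMap_filter_strip,
    ← sorted_rev_head]
  cases hs : PySem.List.sorted (((PySem.Str.split? srcset ",").getD []).filterMap
      (fun p => pvPair (PySem.Str.strip p))) (fun x => x.2) true with
  | nil => rfl
  | cons hd tl => cases hd; rfl
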